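-- pv_equiv track=rewrite | github.com/cloudseeder/oap-dev | reference/oap_discovery/oap_discovery/tool_executor.py | _split_pipeline
-- ===== SOURCE A (Python) =====
-- def _split_pipeline(parts: list[str]) -> list[list[str]]:
--     """Split shlex-tokenized command into pipeline stages at '|' tokens.
--
--     Returns a list of stages, each a list of tokens.  Single-command
--     invocations return a one-element list (no behavior change).
--     """
--     stages: list[list[str]] = [[]]
--     for token in parts:
--         if token == "|":
--             if stages[-1]:  # skip empty stages from leading/double pipes
--                 stages.append([])
--         else:
--             stages[-1].append(token)
--     # Drop any trailing empty stage
--     return [s for s in stages if s]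
-- ===== SOURCE B (Python) =====
-- def _split_pipeline(parts: list[str]) -> list[list[str]]:
--     """Split shlex-tokenized command into pipeline stages at '|' tokens."""
--     stages: list[list[str]] = []
--     i, n = 0, len(parts)
--     while i < n:
--         if parts[i] == "|":
--             i += 1
--         else:
--             j = i + 1
--             while j < n and parts[j] != "|":
--                 j += 1
--             stages.append(parts[i:j])
--             i = j
--     return stages
-- ===== Notes on version B (the rewrite author's own statement) =====
-- stated objective: alternative
-- what changed: Replaces A's stateful stage machine (append to stages[-1], conditionally open a new stage, then filter out empty stages) with a two-pointer scan that skips '|' tokens and slices out each maximal run of non-pipe tokens directly, never materialising empty stages.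
import Mathlib
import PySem

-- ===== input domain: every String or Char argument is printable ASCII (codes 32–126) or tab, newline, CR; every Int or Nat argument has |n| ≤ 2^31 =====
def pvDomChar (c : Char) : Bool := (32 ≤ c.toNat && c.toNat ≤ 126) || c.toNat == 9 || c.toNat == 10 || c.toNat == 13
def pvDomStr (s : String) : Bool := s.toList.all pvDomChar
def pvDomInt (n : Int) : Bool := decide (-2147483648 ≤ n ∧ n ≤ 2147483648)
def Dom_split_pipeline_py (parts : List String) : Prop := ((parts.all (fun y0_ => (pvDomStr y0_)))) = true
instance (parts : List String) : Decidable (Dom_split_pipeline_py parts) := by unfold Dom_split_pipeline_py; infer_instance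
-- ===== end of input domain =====

-- B replaces A's stateful stage machine with a direct scan over maximal runs of non-pipe tokens (alternative decomposition, same cost).

-- ===== PORT A =====
-- A's loop body: stages is always nonempty ([[]] initially), so Python's stages[-1]
-- is modelled exactly by getLastD [] / dropLast on the nonempty state.
def pvAStep (stages : List (List String)) (token : String) : List (List String) :=
  if token = "|" then
    if stages.getLastD [] ≠ [] then stages ++ [[]] else stages
  else
    stages.dropLast ++ [stages.getLastD [] ++ [token]]

def split_pipeline_py (parts : List String) : List (List String) :=
  (parts.foldl pvAStep [[]]).filter (fun s => s ≠ [])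

-- ===== PORT B =====
-- B's outer while-loop over the remaining suffix: skip a '|', otherwise the inner
-- while (j scanning to the next '|') is the takeWhile/dropWhile split of the run.
def split_pipeline_py_alt (parts : List String) : List (List String) :=
  match parts with
  | [] => []
  | t :: rest =>
    if t = "|" then split_pipeline_py_alt rest
    else (t :: rest.takeWhile (fun x => x ≠ "|")) :: split_pipeline_py_alt (rest.dropWhile (fun x => x ≠ "|"))
termination_by parts.length
decreasing_by
  · simp
  · simpa using Nat.lt_succ_of_le (List.length_dropWhile_le _ rest)

-- ===== PRECONDITION & SPEC =====
def Spec_split_pipeline_py (parts : List String) (out : List (List String)) : Prop := out = split_pipeline_py_alt parts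
instance (parts : List String) (out : List (List String)) : Decidable (Spec_split_pipeline_py parts out) := by unfold Spec_split_pipeline_py; infer_instance

-- ===== CLAIM (what is proved, stated in full; the proofs are below) =====
def Claim_equal_split_pipeline_py : Prop := ∀ (parts : List String), Dom_split_pipeline_py parts → Spec_split_pipeline_py parts (split_pipeline_py parts)

-- ===== LEMMAS AND PROOFS =====

-- Characterisation of A's fold: g cur parts = the nonempty stages A still produces
-- given that the current (last) stage holds cur.
def pvG (cur : List String) : List String → List (List String)
  | [] => if cur = [] then [] else [cur]
  | t :: rest =>
    if t = "|" then (if cur = [] then pvG [] rest else cur :: pvG [] rest)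
    else pvG (cur ++ [t]) rest

theorem pvA_foldl (parts : List String) : ∀ (done : List (List String)) (cur : List String),
    ((parts.foldl pvAStep (done ++ [cur])).filter (fun s => s ≠ [])) =
      done.filter (fun s => s ≠ []) ++ pvG cur parts := by
  induction parts with
  | nil => intro done cur; simp [pvG]; by_cases h : cur = [] <;> simp [h]
  | cons t rest ih =>
    intro done cur
    by_cases ht : t = "|"
    · by_cases hc : cur = []
      · have hstep : pvAStep (done ++ [cur]) t = done ++ [cur] := by
          simp [pvAStep, ht, hc]
        rw [List.foldl_cons, hstep, ih done cur]
        simp [pvG, ht, hc]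
      · have hstep : pvAStep (done ++ [cur]) t = (done ++ [cur]) ++ [[]] := by
          simp [pvAStep, ht, hc]
        rw [List.foldl_cons, hstep, ih (done ++ [cur]) []]
        simp [pvG, ht, hc, List.filter_append]
    · have hstep : pvAStep (done ++ [cur]) t = done ++ [cur ++ [t]] := by
        simp [pvAStep, ht]
      rw [List.foldl_cons, hstep, ih done (cur ++ [t])]
      simp [pvG, ht]

-- pvG agrees with B's run-based recursion.
theorem pvG_eq_alt (parts : List String) : ∀ (cur : List String),
    pvG cur parts = if cur = [] then split_pipeline_py_alt parts
      else (cur ++ parts.takeWhile (fun x => x ≠ "|")) ::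
        split_pipeline_py_alt (parts.dropWhile (fun x => x ≠ "|")) := by
  induction parts with
  | nil => intro cur; by_cases h : cur = [] <;> simp [pvG, split_pipeline_py_alt, h]
  | cons t rest ih =>
    intro cur
    by_cases ht : t = "|"
    · by_cases hc : cur = []
      · simp [pvG, ht, hc, split_pipeline_py_alt, ih]
      · simp [pvG, ht, hc, split_pipeline_py_alt, ih]
    · have hne : cur ++ [t] ≠ [] := by simp
      by_cases hc : cur = []
      · simp [pvG, ht, hc, ih, split_pipeline_py_alt]
      · simp [pvG, ht, hc, ih, hne]

-- ===== VERDICT (by name: the statement is the Claim_ definition above) =====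
theorem split_pipeline_py_spec : Claim_equal_split_pipeline_py := by
  intro parts _
  show split_pipeline_py parts = split_pipeline_py_alt parts
  have h := pvA_foldl parts [] []
  simpa [split_pipeline_py, pvG_eq_alt] using h
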